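-- pv_equiv track=rewrite | github.com/pypi-data/pypi-mirror-368 | packages/ishap/ishap-1.0.0.tar.gz/ishap-1.0.0/ishap/_utils.py | get_partition_recursive
-- ===== SOURCE A (Python) =====
-- def get_partition_recursive(collection):
--     if len(collection) == 1:
--         yield [collection]
--         return
--     first = collection[0]
--     for smaller in get_partition_recursive(collection[1:]):
--         for n, subset in enumerate(smaller):
--             yield smaller[:n] + [[first] + subset] + smaller[n+1:]
--         yield [[first]] + smaller
-- ===== SOURCE B (Python) =====
-- def get_partition_recursive(collection):
--     # Iterative: build partitions of suffixes, extending with each earlier element in turn.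
--     parts = [[[collection[-1]]]]
--     for i in range(len(collection) - 2, -1, -1):
--         first = collection[i]
--         new_parts = []
--         for p in parts:
--             for n in range(len(p)):
--                 new_parts.append(p[:n] + [[first] + p[n]] + p[n+1:])
--             new_parts.append([[first]] + p)
--         parts = new_parts
--     yield from parts
-- ===== Notes on version B (the rewrite author's own statement) =====
-- stated objective: alternative
-- what changed: Replaces the recursive generator (recursing on the tail, then nesting two yield loops) by an iterative bottom-up builder: it seeds the single partition of the last element and repeatedly rebuilds the whole list of partitions while walking the earlier elements right-to-left; same output order, return value only (both are generators).
import Mathlib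
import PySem

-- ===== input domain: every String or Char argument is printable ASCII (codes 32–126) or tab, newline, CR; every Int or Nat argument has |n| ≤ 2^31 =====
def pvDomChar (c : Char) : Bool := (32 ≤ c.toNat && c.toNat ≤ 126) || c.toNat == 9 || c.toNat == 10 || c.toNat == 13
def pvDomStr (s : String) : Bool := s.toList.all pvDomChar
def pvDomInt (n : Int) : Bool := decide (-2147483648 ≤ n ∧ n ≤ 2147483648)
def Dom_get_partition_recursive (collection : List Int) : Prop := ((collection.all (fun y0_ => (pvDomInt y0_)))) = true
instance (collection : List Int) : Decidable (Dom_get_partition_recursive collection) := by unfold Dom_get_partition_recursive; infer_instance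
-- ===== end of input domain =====

-- B iteratively builds the partition list bottom-up instead of A's recursion on the tail; return value only (both Pythons are generators).

-- ===== PORT A =====
-- A: recursive generator; each yield is collected in order into the result list.
def get_partition_recursive (collection : List Int) : List (List (List Int)) :=
  match collection with
  | [] => []            -- unreachable under Pre_ (Python raises IndexError on [])
  | [x] => [[[x]]]      -- len == 1: yield [collection]
  | first :: rest =>
      (get_partition_recursive rest).flatMap (fun smaller =>
        (PySem.List.enumerate smaller).map (fun ns =>
          PySem.List.slice smaller none (some ns.1) ++ [first :: ns.2]
            ++ PySem.List.slice smaller (some (ns.1 + 1)) none)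
        ++ [[first] :: smaller])

-- ===== PORT B =====
-- B: the inner double loop that rebuilds new_parts from parts for one element `first`.
def pvStepB (first : Int) (parts : List (List (List Int))) : List (List (List Int)) :=
  parts.flatMap (fun p =>
    (List.range p.length).map (fun n =>
      p.take n ++ [first :: p.getD n []] ++ p.drop (n + 1))
    ++ [[first] :: p])

-- B: seed with the partition of the last element, then walk the earlier elements right-to-left.
def get_partition_recursive_alt (collection : List Int) : List (List (List Int)) :=
  match collection with
  | [] => []            -- unreachable under Pre_ (Python raises IndexError on [])
  | x :: xs => (x :: xs).dropLast.foldr pvStepB [[[(x :: xs).getLast (by simp)]]]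

-- ===== PRECONDITION & SPEC =====
-- Pre_ excludes the empty list, on which both Pythons raise IndexError.
def Pre_get_partition_recursive (collection : List Int) : Prop := collection ≠ []
instance (collection : List Int) : Decidable (Pre_get_partition_recursive collection) := by unfold Pre_get_partition_recursive; infer_instance
def pvWitness_get_partition_recursive : List Int := [1, 2, 3]

def Spec_get_partition_recursive (collection : List Int) (out : List (List (List Int))) : Prop := out = get_partition_recursive_alt collection
instance (collection : List Int) (out : List (List (List Int))) : Decidable (Spec_get_partition_recursive collection out) := by unfold Spec_get_partition_recursive; infer_instance

-- ===== CLAIM (what is proved, stated in full; the proofs are below) =====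
def Claim_equal_get_partition_recursive : Prop := ∀ (collection : List Int), Dom_get_partition_recursive collection → Pre_get_partition_recursive collection → Spec_get_partition_recursive collection (get_partition_recursive collection)

-- ===== LEMMAS AND PROOFS =====

-- A's inner loop body equals B's step, pointwise on one `smaller`.
theorem pvStep_eq (first : Int) (smaller : List (List Int)) :
    (PySem.List.enumerate smaller).map (fun ns =>
      PySem.List.slice smaller none (some ns.1) ++ [first :: ns.2]
        ++ PySem.List.slice smaller (some (ns.1 + 1)) none)
    = (List.range smaller.length).map (fun n =>
        smaller.take n ++ [first :: smaller.getD n []] ++ smaller.drop (n + 1)) := by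
  apply List.ext_getElem
  · simp [PySem.List.length_enumerate]
  · intro k h1 h2
    simp only [List.getElem_map, PySem.List.getElem_enumerate]
    rw [PySem.List.slice_to smaller (by positivity), PySem.List.slice_from smaller (by positivity)]
    have hk : k < smaller.length := by simpa [PySem.List.length_enumerate] using h1
    simp [List.getElem?_eq_getElem hk]

theorem pvA_cons (first : Int) (rest : List Int) (h : rest ≠ []) :
    get_partition_recursive (first :: rest) = pvStepB first (get_partition_recursive rest) := by
  cases rest with
  | nil => exact absurd rfl h
  | cons y ys =>
    rw [get_partition_recursive]
    · unfold pvStepB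
      congr 1
      funext smaller
      rw [pvStep_eq]
    · simp

theorem pvMain (collection : List Int) (h : collection ≠ []) :
    get_partition_recursive collection = get_partition_recursive_alt collection := by
  induction collection with
  | nil => exact absurd rfl h
  | cons x xs ih =>
    cases xs with
    | nil => rfl
    | cons y ys =>
      rw [pvA_cons x (y :: ys) (by simp), ih (by simp)]
      simp only [get_partition_recursive_alt]
      rw [List.dropLast_cons₂, List.foldr_cons]
      simp [List.getLast_cons]

-- ===== VERDICT (by name: the statement is the Claim_ definition above) =====
theorem get_partition_recursive_spec : Claim_equal_get_partition_recursive := by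
  intro c _ hpre
  exact pvMain c hpre
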